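-- pv_equiv track=rewrite | github.com/astikaist/flask-ocr-project | ocr.py | content_post_processing
-- ===== SOURCE A (Python) =====
-- def content_post_processing(text):
--     context = text[0]
--     sentences = context.split("\n")
--     paraghrap = ""
--     before = ""
--
--     for sentence in sentences:
--         if sentence[-1:] == "-":
--             sentence = sentence[0:-1]
--         else:
--             sentence += " "
--
--         if sentence != " ":
--             paraghrap += sentence
--         elif before != " ":
--             paraghrap += "\n"
--         else:
--             paraghrap = paraghrap
--
--         before = sentence
--
--     return paraghrap
-- ===== SOURCE B (Python) =====
-- def content_post_processing(text):
--     transformed = [s[:-1] if s.endswith("-") else s + " " for s in text[0].split("\n")]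
--     parts = []
--     i = 0
--     n = len(transformed)
--     while i < n:
--         if transformed[i] == " ":
--             parts.append("\n")
--             while i < n and transformed[i] == " ":
--                 i += 1
--         else:
--             parts.append(transformed[i])
--             i += 1
--     return "".join(parts)
-- ===== Notes on version B (the rewrite author's own statement) =====
-- stated objective: simpler
-- what changed: Replaces A's single stateful fold carrying a 'before' variable with a two-phase decomposition: map the hyphen/space transform over the split lines, then collapse each run of blank transformed lines into one newline and join the parts.
import Mathlib
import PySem

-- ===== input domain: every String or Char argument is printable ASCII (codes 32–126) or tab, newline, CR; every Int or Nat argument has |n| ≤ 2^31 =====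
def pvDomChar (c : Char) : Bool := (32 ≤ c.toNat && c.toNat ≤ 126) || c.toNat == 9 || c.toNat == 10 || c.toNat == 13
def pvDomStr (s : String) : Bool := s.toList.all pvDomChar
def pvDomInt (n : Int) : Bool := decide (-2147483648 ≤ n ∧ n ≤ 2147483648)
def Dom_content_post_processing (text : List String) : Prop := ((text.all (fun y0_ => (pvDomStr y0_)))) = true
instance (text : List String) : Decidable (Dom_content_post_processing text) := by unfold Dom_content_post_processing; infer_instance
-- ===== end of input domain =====

-- B rewrites A's single stateful fold as "map the hyphen/space transform, then collapse runs of
-- blank transformed lines into one newline" — a simpler two-phase decomposition, same return value.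

-- ===== PORT A =====
-- A, transliterated: text[0]; split on "\n"; one fold carrying (paraghrap, before).
def content_post_processing (text : List String) : String :=
  match PySem.List.pyGet? text 0 with
  | none => ""   -- text[0] raises IndexError here; excluded by Pre_
  | some context =>
    let sentences := PySem.Chars.splitOn context.toList ['\n']
    let st := sentences.foldl (fun (st : List Char × List Char) sentence =>
      -- if sentence[-1:] == "-": sentence = sentence[0:-1] else: sentence += " "
      let s := if PySem.List.slice sentence (some (-1)) none = ['-']
               then PySem.List.slice sentence (some 0) (some (-1))
               else sentence ++ [' ']
      let p := if s ≠ [' '] then st.1 ++ s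
               else if st.2 ≠ [' '] then st.1 ++ ['\n']
               else st.1
      (p, s)) ([], [])
    String.ofList st.1

-- ===== PORT B =====
-- Source B's comprehension: s[:-1] if s.endswith("-") else s + " "
def cppTransform (s : List Char) : List Char :=
  if PySem.Chars.endswith s ['-'] then PySem.List.slice s none (some (-1)) else s ++ [' ']

-- Source B's while loop over `transformed`: emit "\n" for a run of " " (inner skip loop), else the line.
def cppCollapse : List (List Char) → List (List Char)
  | [] => []
  | t :: rest =>
    if t = [' '] then ['\n'] :: cppCollapse (rest.dropWhile (· == [' ']))
    else t :: cppCollapse rest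
termination_by ts => ts.length
decreasing_by
  · exact Nat.lt_succ_of_le (List.length_dropWhile_le _ _)
  · simp

def content_post_processing_alt (text : List String) : String :=
  match PySem.List.pyGet? text 0 with
  | none => ""   -- text[0] raises IndexError here; excluded by Pre_
  | some context =>
    let transformed := (PySem.Chars.splitOn context.toList ['\n']).map cppTransform
    String.ofList (PySem.Chars.join [] (cppCollapse transformed))

-- ===== PRECONDITION & SPEC =====
-- A evaluates text[0]: the empty list raises IndexError, everything else returns normally.
def Pre_content_post_processing (text : List String) : Prop := text ≠ []
instance (text : List String) : Decidable (Pre_content_post_processing text) := by unfold Pre_content_post_processing; infer_instance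

def pvWitness_content_post_processing : List String := ["ab-\ncd\n\nef"]

def Spec_content_post_processing (text : List String) (out : String) : Prop := out = content_post_processing_alt text
instance (text : List String) (out : String) : Decidable (Spec_content_post_processing text out) := by unfold Spec_content_post_processing; infer_instance

-- ===== CLAIM (what is proved, stated in full; the proofs are below) =====
def Claim_equal_content_post_processing : Prop := ∀ (text : List String), Dom_content_post_processing text → Pre_content_post_processing text → Spec_content_post_processing text (content_post_processing text)

-- ===== LEMMAS AND PROOFS =====

-- A's in-loop transform computes exactly B's cppTransform.
theorem cppTransform_eq (s : List Char) :
    (if PySem.List.slice s (some (-1)) none = ['-']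
     then PySem.List.slice s (some 0) (some (-1))
     else s ++ [' ']) = cppTransform s := by
  unfold cppTransform
  have hcond : (PySem.List.slice s (some (-1)) none = ['-']) ↔ (PySem.Chars.endswith s ['-'] = true) := by
    rw [PySem.List.slice_from_neg_one, PySem.Chars.endswith_iff]
    constructor
    · intro h
      rcases List.eq_nil_or_concat s with rfl | ⟨ys, y, rfl⟩
      · simp at h
      · simp only [List.concat_eq_append] at h ⊢
        have hd : (ys ++ [y]).drop ((ys ++ [y]).length - 1) = [y] := by simp
        rw [hd] at h
        simp at h
        simp [h]
    · rintro ⟨t, rfl⟩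
      simp
  rw [PySem.List.slice_zero_start]
  split_ifs with h1 h2 h2
  · rfl
  · exact absurd (hcond.mp h1) h2
  · exact absurd (hcond.mpr h2) h1
  · rfl

theorem join_nil_eq_flatten (ps : List (List Char)) : PySem.Chars.join [] ps = ps.flatten := by
  simp [PySem.Chars.join, List.intercalate]
  induction ps with
  | nil => simp
  | cons a t ih => cases t <;> simp_all [List.intersperse]

-- Loop invariant: A's fold over the transformed lines, started at paragraph p and previous line b,
-- appends exactly the flattening of B's collapsed list (blanks at the front are skipped when b is blank).
theorem foldl_eq_collapse (ts : List (List Char)) :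
    ∀ (p b : List Char),
    (ts.foldl (fun (st : List Char × List Char) t =>
      (if t ≠ [' '] then st.1 ++ t
       else if st.2 ≠ [' '] then st.1 ++ ['\n']
       else st.1, t)) (p, b)).1
    = p ++ (cppCollapse (if b = [' '] then ts.dropWhile (· == [' ']) else ts)).flatten := by
  induction ts with
  | nil =>
    intro p b
    split_ifs <;> simp [cppCollapse]
  | cons t rest ih =>
    intro p b
    by_cases ht : t = [' ']
    · subst ht
      simp only [List.foldl_cons, ne_eq, not_true_eq_false, if_false]
      by_cases hb : b = [' ']
      · rw [if_neg (by simp [hb])]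
        rw [ih p [' ']]
        simp [hb]
      · rw [if_pos hb]
        rw [ih (p ++ ['\n']) [' ']]
        rw [if_neg hb, if_pos rfl]
        rw [cppCollapse]
        simp

    · have hside : (if b = [' '] then (t :: rest).dropWhile (· == [' ']) else t :: rest) = t :: rest := by
        split_ifs with hb
        · simp [ht]
        · rfl
      rw [hside]
      simp only [List.foldl_cons, ne_eq, ht, not_false_eq_true, if_pos]
      rw [ih (p ++ t) t]
      rw [if_neg ht]
      rw [cppCollapse]
      simp [ht]

-- ===== VERDICT (by name: the statement is the Claim_ definition above) =====
theorem content_post_processing_spec : Claim_equal_content_post_processing := by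
  intro text _ _
  unfold Spec_content_post_processing content_post_processing content_post_processing_alt
  cases h : PySem.List.pyGet? text 0 with
  | none => rfl
  | some context =>
    simp only
    congr 1
    rw [join_nil_eq_flatten]
    have hmap : ∀ (ss : List (List Char)) (st0 : List Char × List Char),
        ss.foldl (fun (st : List Char × List Char) sentence =>
          (let s := if PySem.List.slice sentence (some (-1)) none = ['-']
                    then PySem.List.slice sentence (some 0) (some (-1))
                    else sentence ++ [' ']
           let p := if s ≠ [' '] then st.1 ++ s
                    else if st.2 ≠ [' '] then st.1 ++ ['\n']
                    else st.1
           (p, s))) st0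
        = (ss.map cppTransform).foldl (fun (st : List Char × List Char) t =>
            (if t ≠ [' '] then st.1 ++ t
             else if st.2 ≠ [' '] then st.1 ++ ['\n']
             else st.1, t)) st0 := by
      intro ss st0
      rw [List.foldl_map]
      congr 1
      funext st s
      simp only [cppTransform_eq]
    rw [hmap]
    rw [foldl_eq_collapse]
    simp
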